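-- pv_equiv track=rewrite | github.com/cwwjacobs/ixC | indexConstellation/packages/ixc-core-ndrp/extraction/classifier.py | detect_mode
-- ===== SOURCE A (Python) =====
-- from typing import Literal
--
-- ModeType = Literal["instruction", "conversation", "narrative", "reasoning", "context", "meta", "emotion", "other"]
--
-- def detect_mode(text: str) -> ModeType:
--     """
--     Detect the mode of a text entry using simple heuristics.
--
--     This is a basic classifier that uses text patterns to determine
--     the likely mode of the entry. More sophisticated classification
--     can be added in future versions.
--
--     Args:
--         text: The text to classify
--
--     Returns:
--         One of: "instruction", "conversation", "narrative", "reasoning",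
--                 "context", "meta", "emotion", "other"
--     """
--     text_lower = text.lower()
--
--     # Reasoning patterns (check first - more specific)
--     reasoning_markers = [
--         "because", "therefore", "thus", "hence",
--         "consequently", "as a result", "this means",
--         "let's think", "step by step", "first,", "second,"
--     ]
--     if any(marker in text_lower for marker in reasoning_markers):
--         return "reasoning"
--
--     # Instruction patterns
--     instruction_markers = [
--         "how to", "please", "can you", "could you", "would you",
--         "tell me", "show me", "explain", "describe", "define",
--         "what is", "what are", "why", "when", "where"
--     ]
--     if any(marker in text_lower for marker in instruction_markers):
--         return "instruction"
--
--     # Narrative patterns (check before conversation - more specific)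
--     narrative_markers = [
--         "once upon", "story", "tale", "long ago",
--         "there was", "there were", "in the beginning"
--     ]
--     if any(marker in text_lower for marker in narrative_markers):
--         return "narrative"
--
--     # Conversation patterns
--     conversation_markers = [
--         "hello", "hi ", " hey ", "thanks", "thank you",
--         "goodbye", "bye", "see you", "nice to"
--     ]
--     if any(marker in text_lower for marker in conversation_markers):
--         return "conversation"
--
--     # Emotion patterns
--     emotion_markers = [
--         "feel", "feeling", "felt", "emotion", "happy", "sad",
--         "angry", "excited", "worried", "anxious", "love", "hate"
--     ]
--     if any(marker in text_lower for marker in emotion_markers):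
--         return "emotion"
--
--     # Meta patterns (discussing the conversation itself)
--     meta_markers = [
--         "this conversation", "our discussion", "what we're talking about",
--         "the topic", "let's change", "back to"
--     ]
--     if any(marker in text_lower for marker in meta_markers):
--         return "meta"
--
--     # Default to "other" if no clear pattern is detected
--     return "other"
-- ===== SOURCE B (Python) =====
-- _MODE_NAMES = ["reasoning", "instruction", "narrative", "conversation", "emotion", "meta", "other"]
--
-- _MARKER_GROUPS = [
--     ["because", "therefore", "thus", "hence",
--      "consequently", "as a result", "this means",
--      "let's think", "step by step", "first,", "second,"],
--     ["how to", "please", "can you", "could you", "would you",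
--      "tell me", "show me", "explain", "describe", "define",
--      "what is", "what are", "why", "when", "where"],
--     ["once upon", "story", "tale", "long ago",
--      "there was", "there were", "in the beginning"],
--     ["hello", "hi ", " hey ", "thanks", "thank you",
--      "goodbye", "bye", "see you", "nice to"],
--     ["feel", "feeling", "felt", "emotion", "happy", "sad",
--      "angry", "excited", "worried", "anxious", "love", "hate"],
--     ["this conversation", "our discussion", "what we're talking about",
--      "the topic", "let's change", "back to"],
-- ]
--
-- _FLAT_MARKERS = [(m, p) for p, ms in enumerate(_MARKER_GROUPS) for m in ms]
--
-- def detect_mode(text: str) -> str: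
--     # No early return: fold over all markers keeping the minimum matched priority.
--     t = text.lower()
--     best = 6
--     for marker, p in _FLAT_MARKERS:
--         if marker in t:
--             best = min(best, p)
--     return _MODE_NAMES[best]
-- ===== Notes on version B (the rewrite author's own statement) =====
-- stated objective: alternative
-- what changed: Instead of six short-circuiting if-blocks returning on first group match, B flattens all markers into (marker, priority) pairs, folds once over all of them keeping the minimum matched priority with no early return, and maps the final priority to its mode name.
import Mathlib
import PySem

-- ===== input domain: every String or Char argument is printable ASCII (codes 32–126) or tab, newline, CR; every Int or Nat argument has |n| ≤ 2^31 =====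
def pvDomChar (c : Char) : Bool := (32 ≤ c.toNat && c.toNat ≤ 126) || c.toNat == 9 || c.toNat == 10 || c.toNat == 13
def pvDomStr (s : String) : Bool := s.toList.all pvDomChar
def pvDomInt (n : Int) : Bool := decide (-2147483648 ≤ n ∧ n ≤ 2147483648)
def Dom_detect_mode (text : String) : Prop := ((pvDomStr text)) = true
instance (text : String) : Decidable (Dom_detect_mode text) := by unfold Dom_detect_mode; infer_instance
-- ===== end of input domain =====

-- B replaces the six short-circuiting if-blocks by one flat fold over (marker, priority) pairs
-- keeping the minimum matched priority, then maps that priority to its mode name; objective: alternative.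


-- ===== PORT A =====
def detect_mode (text : String) : String :=
  let text_lower := PySem.Str.lower text
  let reasoning_markers : List String := ["because", "therefore", "thus", "hence",
    "consequently", "as a result", "this means",
    "let's think", "step by step", "first,", "second,"]
  if reasoning_markers.any (fun marker => PySem.Str.isIn marker text_lower) then "reasoning"
  else
    let instruction_markers : List String := ["how to", "please", "can you", "could you", "would you",
      "tell me", "show me", "explain", "describe", "define",
      "what is", "what are", "why", "when", "where"]
    if instruction_markers.any (fun marker => PySem.Str.isIn marker text_lower) then "instruction"
    else
      let narrative_markers : List String := ["once upon", "story", "tale", "long ago",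
        "there was", "there were", "in the beginning"]
      if narrative_markers.any (fun marker => PySem.Str.isIn marker text_lower) then "narrative"
      else
        let conversation_markers : List String := ["hello", "hi ", " hey ", "thanks", "thank you",
          "goodbye", "bye", "see you", "nice to"]
        if conversation_markers.any (fun marker => PySem.Str.isIn marker text_lower) then "conversation"
        else
          let emotion_markers : List String := ["feel", "feeling", "felt", "emotion", "happy", "sad",
            "angry", "excited", "worried", "anxious", "love", "hate"]
          if emotion_markers.any (fun marker => PySem.Str.isIn marker text_lower) then "emotion"
          else
            let meta_markers : List String := ["this conversation", "our discussion", "what we're talking about",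
              "the topic", "let's change", "back to"]
            if meta_markers.any (fun marker => PySem.Str.isIn marker text_lower) then "meta"
            else "other"

-- ===== PORT B =====
def pvModeNames : List String :=
  ["reasoning", "instruction", "narrative", "conversation", "emotion", "meta", "other"]

def pvMarkerGroups : List (List String) :=
  [["because", "therefore", "thus", "hence",
    "consequently", "as a result", "this means",
    "let's think", "step by step", "first,", "second,"],
   ["how to", "please", "can you", "could you", "would you",
    "tell me", "show me", "explain", "describe", "define",
    "what is", "what are", "why", "when", "where"],
   ["once upon", "story", "tale", "long ago",
    "there was", "there were", "in the beginning"],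
   ["hello", "hi ", " hey ", "thanks", "thank you",
    "goodbye", "bye", "see you", "nice to"],
   ["feel", "feeling", "felt", "emotion", "happy", "sad",
    "angry", "excited", "worried", "anxious", "love", "hate"],
   ["this conversation", "our discussion", "what we're talking about",
    "the topic", "let's change", "back to"]]

-- [(m, p) for p, ms in enumerate(_MARKER_GROUPS) for m in ms]
def pvFlatMarkers : List (String × Int) :=
  (PySem.List.enumerate pvMarkerGroups).flatMap (fun pm => pm.2.map (fun m => (m, pm.1)))

def detect_mode_alt (text : String) : String :=
  let t := PySem.Str.lower text
  let best : Int :=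
    pvFlatMarkers.foldl (fun best mp => if PySem.Str.isIn mp.1 t then min best mp.2 else best) 6
  (PySem.List.pyGet? pvModeNames best).getD ""   -- index is always in range (0 ≤ best ≤ 6)

-- ===== PRECONDITION & SPEC =====
def Spec_detect_mode (text : String) (out : String) : Prop := out = detect_mode_alt text
instance (text : String) (out : String) : Decidable (Spec_detect_mode text out) := by unfold Spec_detect_mode; infer_instance

-- ===== CLAIM (what is proved, stated in full; the proofs are below) =====
def Claim_equal_detect_mode : Prop := ∀ (text : String), Dom_detect_mode text → Spec_detect_mode text (detect_mode text)

-- ===== LEMMAS AND PROOFS =====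

-- Folding B's min-accumulator over one priority group: result = min with p iff some marker of the group matches.
theorem pvFoldGroup (t : String) (p : Int) (ms : List String) (acc : Int) :
    (ms.map (fun m => (m, p))).foldl
      (fun best mp => if PySem.Str.isIn mp.1 t then min best mp.2 else best) acc
    = if ms.any (fun m => PySem.Str.isIn m t) then min acc p else acc := by
  induction ms generalizing acc with
  | nil => simp
  | cons m rest ih =>
    simp only [List.map_cons, List.foldl_cons, List.any_cons]
    rcases Bool.eq_false_or_eq_true (PySem.Str.isIn m t) with h | h <;>
      simp only [h, ih] <;>
      by_cases h' : (rest.any fun m => PySem.Str.isIn m t) = true <;>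
      simp [h', min_assoc]

set_option maxHeartbeats 2000000 in
theorem detect_mode_eq_alt (text : String) : detect_mode text = detect_mode_alt text := by
  unfold detect_mode detect_mode_alt
  simp only [pvFlatMarkers, pvMarkerGroups,
    PySem.List.enumerate_cons, PySem.List.enumerate_nil,
    List.flatMap_cons, List.flatMap_nil, List.append_nil,
    List.foldl_append, pvFoldGroup]
  cases h0 : (["because", "therefore", "thus", "hence", "consequently", "as a result", "this means", "let's think", "step by step", "first,", "second,"] : List String).any (fun m => PySem.Str.isIn m (PySem.Str.lower text)) <;>
  cases h1 : (["how to", "please", "can you", "could you", "would you", "tell me", "show me", "explain", "describe", "define", "what is", "what are", "why", "when", "where"] : List String).any (fun m => PySem.Str.isIn m (PySem.Str.lower text)) <;>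
  cases h2 : (["once upon", "story", "tale", "long ago", "there was", "there were", "in the beginning"] : List String).any (fun m => PySem.Str.isIn m (PySem.Str.lower text)) <;>
  cases h3 : (["hello", "hi ", " hey ", "thanks", "thank you", "goodbye", "bye", "see you", "nice to"] : List String).any (fun m => PySem.Str.isIn m (PySem.Str.lower text)) <;>
  cases h4 : (["feel", "feeling", "felt", "emotion", "happy", "sad", "angry", "excited", "worried", "anxious", "love", "hate"] : List String).any (fun m => PySem.Str.isIn m (PySem.Str.lower text)) <;>
  cases h5 : (["this conversation", "our discussion", "what we're talking about", "the topic", "let's change", "back to"] : List String).any (fun m => PySem.Str.isIn m (PySem.Str.lower text)) <;> decide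

-- ===== VERDICT (by name: the statement is the Claim_ definition above) =====
theorem detect_mode_spec : Claim_equal_detect_mode := by
  intro text _
  exact detect_mode_eq_alt text
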